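-- pv_equiv track=rewrite | github.com/huangzz02/JudgeGirl | Python/ch10 function/10115 我們能夠在一起嗎？/10115.py | compatibility
-- ===== SOURCE A (Python) =====
-- def compatibility(str1, str2):
--     combined_str = (str1 + str2).lower()
--     data = []
--     seen = set()
--     for ch in combined_str:
--         if ch not in seen:
--             seen.add(ch)
--             count = combined_str.count(ch)
--             for digit in str(count): # easily overlooked
--                 data.append(int(digit))
--
--     while len(data) > 2:
--         if data == [1, 0, 0]:
--             return 100
--
--         new_data = []
--         for i in range(len(data) // 2):
--             tmp_add = data[i] + data[-(i + 1)]
--             for digit in str(tmp_add):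
--                 new_data.append(int(digit))
--         if len(data) % 2 == 1:
--             new_data.append(data[len(data) // 2])
--         data = new_data
--
--     return data[0] * 10 + data[1]
-- ===== SOURCE B (Python) =====
-- def _digits(n):
--     return [int(d) for d in str(n)]
--
-- def _fold(data):
--     if len(data) <= 2:
--         return data[0] * 10 + data[1]
--     if data == [1, 0, 0]:
--         return 100
--     new_data = []
--     for x, y in zip(data[:len(data) // 2], reversed(data)):
--         s = x + y
--         if s >= 10:
--             new_data.append(1)
--             new_data.append(s - 10)
--         else:
--             new_data.append(s)
--     if len(data) % 2 == 1:
--         new_data.append(data[len(data) // 2])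
--     return _fold(new_data)
--
-- def compatibility(str1, str2):
--     combined_str = (str1 + str2).lower()
--     counts = {}
--     for ch in combined_str:
--         counts[ch] = counts.get(ch, 0) + 1
--     data = []
--     for cnt in counts.values():
--         data.extend(_digits(cnt))
--     return _fold(data)
-- ===== Notes on version B (the rewrite author's own statement) =====
-- stated objective: alternative
-- what changed: Phase 1 replaces the seen-set plus a full `combined_str.count(ch)` rescan per distinct character by a single counting-dict pass; phase 2 replaces the while loop's str()-based digit re-splitting and negative indexing by a recursive fold that zips the front half with the reversed list and emits carry digits arithmetically.
import Mathlib
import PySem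

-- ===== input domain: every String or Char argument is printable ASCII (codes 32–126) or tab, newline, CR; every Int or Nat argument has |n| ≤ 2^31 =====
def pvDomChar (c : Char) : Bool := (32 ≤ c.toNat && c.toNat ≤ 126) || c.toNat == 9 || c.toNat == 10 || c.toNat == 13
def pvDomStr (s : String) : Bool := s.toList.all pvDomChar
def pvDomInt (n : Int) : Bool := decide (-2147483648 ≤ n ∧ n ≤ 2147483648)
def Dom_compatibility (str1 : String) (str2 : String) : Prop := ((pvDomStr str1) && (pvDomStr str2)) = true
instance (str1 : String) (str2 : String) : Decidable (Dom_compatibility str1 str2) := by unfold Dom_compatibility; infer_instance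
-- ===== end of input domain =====

-- B replaces A's seen-set + per-character `str.count` rescans by one counting-dict pass, and A's
-- string-based digit re-splitting inside the pairwise fold by direct carry arithmetic in a
-- recursive fold over the front half zipped with the reversed list.

-- digits of str(n) as ints (B's `_digits` helper; A builds the same digits inline)
def pvDigits (m : Int) : List Int :=
  (PySem.Int.toChars m).foldl (fun acc c => acc ++ [(PySem.Int.ofChars? [c]).getD 0]) []

-- fuel bound for A's while loop / B's recursion: length + digit-sum strictly decreases each
-- round, so this guard is never exhausted (a totality guard only, not an algorithm switch)
def pvFuel (data : List Int) : Nat := data.length + (data.map Int.toNat).sum + 1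

-- ===== PORT A =====
-- body of A's while loop: one halving round
def pvStepA (data : List Int) : List Int :=
  let n : Int := data.length
  let nd := (PySem.List.pyRange 0 (PySem.Int.floordiv n 2) 1).foldl
      (fun acc i =>
        (PySem.Int.toChars (PySem.List.pyGetD data i 0 + PySem.List.pyGetD data (-(i+1)) 0)).foldl
          (fun a c => a ++ [(PySem.Int.ofChars? [c]).getD 0]) acc) []
  if PySem.Int.mod n 2 == 1 then nd ++ [PySem.List.pyGetD data (PySem.Int.floordiv n 2) 0] else nd

-- A's `while len(data) > 2` loop (fueled; the fuel-0 branch is unreachable)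
def pvLoopA : Nat → List Int → Int
  | 0, data => PySem.List.pyGetD data 0 0 * 10 + PySem.List.pyGetD data 1 0
  | f+1, data =>
    if 2 < data.length then
      if data = [1, 0, 0] then 100 else pvLoopA f (pvStepA data)
    else PySem.List.pyGetD data 0 0 * 10 + PySem.List.pyGetD data 1 0

def compatibility (str1 : String) (str2 : String) : Int :=
  let combined := PySem.Chars.lower (str1.toList ++ str2.toList)
  let data := (combined.foldl
    (fun st ch =>
      if PySem.Set.contains st.2 ch then st
      else ((PySem.Int.toChars ((PySem.Chars.count combined [ch] : Nat) : Int)).foldl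
              (fun acc c => acc ++ [(PySem.Int.ofChars? [c]).getD 0]) st.1,
            PySem.Set.add st.2 ch))
    (([] : List Int), PySem.Set.empty)).1
  pvLoopA (pvFuel data) data

-- ===== PORT B =====
-- B's halving round: zip the front half with the reversed list, add with an explicit carry
def pvStepB (data : List Int) : List Int :=
  let n : Int := data.length
  let nd := (List.zip (PySem.List.slice data none (some (PySem.Int.floordiv n 2))) data.reverse).foldl
      (fun acc p => if 10 ≤ p.1 + p.2 then acc ++ [1, p.1 + p.2 - 10] else acc ++ [p.1 + p.2]) []
  if PySem.Int.mod n 2 == 1 then nd ++ [PySem.List.pyGetD data (PySem.Int.floordiv n 2) 0] else nd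

-- B's recursive `_fold` (fueled; the fuel-0 branch is unreachable)
def pvFoldB : Nat → List Int → Int
  | 0, data => PySem.List.pyGetD data 0 0 * 10 + PySem.List.pyGetD data 1 0
  | f+1, data =>
    if data.length ≤ 2 then PySem.List.pyGetD data 0 0 * 10 + PySem.List.pyGetD data 1 0
    else if data = [1, 0, 0] then 100 else pvFoldB f (pvStepB data)

def compatibility_alt (str1 : String) (str2 : String) : Int :=
  let combined := PySem.Chars.lower (str1.toList ++ str2.toList)
  let counts := combined.foldl (fun d ch => d.insert ch (d.getD ch 0 + 1)) PySem.Dict.empty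
  let data := counts.values.foldl (fun acc cnt => acc ++ pvDigits cnt) []
  pvFoldB (pvFuel data) data

-- ===== PRECONDITION & SPEC =====
-- Pre_ excludes exactly the inputs on which A raises IndexError (fewer than two digits reach
-- the final `data[0]*10+data[1]`: under two distinct characters and fewer than ten characters
-- in the lowered combined string).  B raises there too.
def Pre_compatibility (str1 : String) (str2 : String) : Prop :=
  2 ≤ (PySem.List.dedup (PySem.Chars.lower (str1.toList ++ str2.toList))).length ∨
    10 ≤ (PySem.Chars.lower (str1.toList ++ str2.toList)).length
instance (str1 : String) (str2 : String) : Decidable (Pre_compatibility str1 str2) := by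
  unfold Pre_compatibility; infer_instance

def pvWitness_compatibility : String × String := ("ab", "ba")

def Spec_compatibility (str1 : String) (str2 : String) (out : Int) : Prop := out = compatibility_alt str1 str2
instance (str1 : String) (str2 : String) (out : Int) : Decidable (Spec_compatibility str1 str2 out) := by unfold Spec_compatibility; infer_instance

-- ===== CLAIM (what is proved, stated in full; the proofs are below) =====
def Claim_equal_compatibility : Prop := ∀ (str1 : String) (str2 : String), Dom_compatibility str1 str2 → Pre_compatibility str1 str2 → Spec_compatibility str1 str2 (compatibility str1 str2)

-- ===== LEMMAS AND PROOFS =====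

-- pvDigits as a map over the decimal characters
theorem pvDigits_eq_map (m : Int) :
    pvDigits m = (PySem.Int.toChars m).map (fun c => (PySem.Int.ofChars? [c]).getD 0) := by
  unfold pvDigits
  rw [PySem.List.foldl_append_singleton_eq_map]
  simp

-- A's inner `for digit in str(...)` loop appended onto an accumulator
theorem digits_fold_eq (m : Int) (init : List Int) :
    (PySem.Int.toChars m).foldl (fun acc c => acc ++ [(PySem.Int.ofChars? [c]).getD 0]) init
      = init ++ pvDigits m := by
  rw [PySem.List.foldl_append_singleton_eq_map, pvDigits_eq_map]

-- digit semantics for the pair sums (operands are single digits, so the sum is 0..18)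
theorem pvDigits_small (m : Int) (h0 : 0 ≤ m) (h18 : m ≤ 18) :
    pvDigits m = if 10 ≤ m then [1, m - 10] else [m] := by
  unfold pvDigits; interval_cases m <;> decide

-- every character of str(n) (n ≥ 0) is a decimal digit char, so its int value is 0..9
theorem mem_toDigitsCore (fuel n : Nat) (l : List Char) :
    ∀ c ∈ Nat.toDigitsCore 10 fuel n l, c ∈ l ∨ ∃ d : Nat, d < 10 ∧ c = Nat.digitChar d := by
  induction fuel generalizing n l with
  | zero => intro c hc; exact Or.inl hc
  | succ fuel ih =>
    intro c hc
    simp only [Nat.toDigitsCore] at hc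
    by_cases hz : n / 10 = 0
    · simp only [hz, if_true] at hc
      rcases List.mem_cons.mp hc with h | h
      · exact Or.inr ⟨n % 10, Nat.mod_lt _ (by norm_num), h⟩
      · exact Or.inl h
    · simp only [hz, if_false] at hc
      rcases ih (n / 10) (Nat.digitChar (n % 10) :: l) c hc with h | h
      · rcases List.mem_cons.mp h with h' | h'
        · exact Or.inr ⟨n % 10, Nat.mod_lt _ (by norm_num), h'⟩
        · exact Or.inl h'
      · exact Or.inr h

theorem pvDigits_bounds (m : Int) (hm : 0 ≤ m) : ∀ x ∈ pvDigits m, 0 ≤ x ∧ x ≤ 9 := by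
  intro x hx
  rw [pvDigits_eq_map] at hx
  rcases List.mem_map.mp hx with ⟨c, hc, rfl⟩
  have hc' : c ∈ Nat.toDigits 10 m.toNat := by
    unfold PySem.Int.toChars at hc
    rw [if_neg (by omega)] at hc
    exact hc
  rcases mem_toDigitsCore _ _ _ c hc' with h | ⟨d, hd, rfl⟩
  · simp at h
  · interval_cases d <;> decide

-- ---- phase 1: first-occurrence digit emission = counting dict ----

theorem countgo_singleton (c : Char) :
    ∀ (fuel : Nat) (l : List Char) (acc : Nat), l.length ≤ fuel →
      PySem.Chars.count.go [c] fuel l acc = acc + l.count c := by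
  intro fuel
  induction fuel with
  | zero =>
    intro l acc h
    have : l = [] := List.eq_nil_of_length_eq_zero (Nat.le_zero.mp h)
    subst this; simp [PySem.Chars.count.go]
  | succ fuel ih =>
    intro l acc h
    cases l with
    | nil => simp [PySem.Chars.count.go]
    | cons hd t =>
      simp only [PySem.Chars.count.go]
      simp only [List.length_cons] at h
      have hpre : [c].isPrefixOf (hd :: t) = (c == hd) := by simp [List.isPrefixOf]
      by_cases hch : c = hd
      · subst hch
        rw [if_pos (by simp [hpre])]
        rw [show List.drop [c].length (c :: t) = t from rfl]
        rw [ih t (acc + 1) (by omega)]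
        simp
        omega
      · rw [if_neg (by simp [hpre, hch])]
        rw [ih t acc (by omega)]
        have hne : (hd == c) = false := by simp [Ne.symm hch]
        simp [List.count_cons, hne]

theorem count_singleton (s : List Char) (c : Char) :
    PySem.Chars.count s [c] = s.count c := by
  unfold PySem.Chars.count
  rw [if_neg (by simp)]
  simpa using countgo_singleton c s.length s 0 le_rfl

-- A's dedup-by-seen-set loop, characterised
theorem phase1_eq (g : Char → List Int) :
    ∀ (l : List Char) (data : List Int) (seen : PySem.Set Char),
      (l.foldl (fun st ch => if PySem.Set.contains st.2 ch then st
          else (st.1 ++ g ch, PySem.Set.add st.2 ch)) (data, seen)).1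
        = data ++ ((PySem.Set.ofList l).filter (fun c => !(PySem.Set.contains seen c))).flatMap g := by
  intro l
  induction l with
  | nil => intro data seen; simp
  | cons c t ih =>
    intro data seen
    simp only [List.foldl_cons]
    by_cases hc : PySem.Set.contains seen c
    · rw [if_pos hc, ih data seen]
      congr 1
      rw [PySem.Set.ofList_cons]
      simp only [PySem.Set.discard, List.filter_cons, hc, Bool.not_true, List.filter_filter]
      congr 1
      apply List.filter_congr
      intro a _
      by_cases hac : a = c
      · subst hac
        have : a ∈ seen := (PySem.Set.contains_iff seen a).mp hc
        simp [this]
      · simp [hac]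
    · rw [if_neg hc]
      rw [ih (data ++ g c) (PySem.Set.add seen c)]
      have hmem : c ∉ seen := fun h => hc ((PySem.Set.contains_iff seen c).mpr h)
      rw [PySem.Set.ofList_cons]
      simp only [List.filter_cons, hc, Bool.not_false, if_true]
      simp only [List.flatMap_cons, List.append_assoc]
      simp only [PySem.Set.discard, List.filter_filter]
      have hfilt : ∀ a ∈ PySem.Set.ofList t,
          (!PySem.Set.contains (PySem.Set.add seen c) a) = (!PySem.Set.contains seen a && !(a == c)) := by
        intro a _
        rw [PySem.Set.add_of_not_mem hmem]
        by_cases hac : a = c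
        · subst hac
          have : a ∉ seen := hmem
          simp [PySem.Set.contains, this]
        · have h1 : (a == c) = false := by simp [hac]
          simp [PySem.Set.contains, h1]
          exact fun _ => hac
      rw [List.filter_congr hfilt]

-- canonical form of the phase-1 digit list
def pvData (combined : List Char) : List Int :=
  (PySem.Set.ofList combined).flatMap (fun ch => pvDigits ((combined.count ch : Nat) : Int))

theorem dataA_eq (combined : List Char) :
    (combined.foldl
      (fun st ch =>
        if PySem.Set.contains st.2 ch then st
        else ((PySem.Int.toChars ((PySem.Chars.count combined [ch] : Nat) : Int)).foldl
                (fun acc c => acc ++ [(PySem.Int.ofChars? [c]).getD 0]) st.1,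
              PySem.Set.add st.2 ch))
      (([] : List Int), PySem.Set.empty)).1 = pvData combined := by
  rw [PySem.List.foldl_congr_mem _ _
    (fun st ch => if PySem.Set.contains st.2 ch then st
      else (st.1 ++ pvDigits ((PySem.Chars.count combined [ch] : Nat) : Int), PySem.Set.add st.2 ch))
    _ (by
      intro acc x _
      rw [digits_fold_eq])]
  rw [phase1_eq]
  unfold pvData
  have : ∀ a, (!PySem.Set.contains (PySem.Set.empty : PySem.Set Char) a) = true := by
    intro a; simp [PySem.Set.empty, PySem.Set.contains]
  rw [List.filter_congr (fun a _ => this a), List.filter_true]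
  simp only [List.nil_append]
  rw [List.flatMap_def, List.flatMap_def]
  congr 1
  apply List.map_congr_left
  intro a _
  rw [count_singleton]

theorem dataB_eq (combined : List Char) :
    ((combined.foldl (fun d ch => d.insert ch (d.getD ch 0 + 1)) PySem.Dict.empty).values.foldl
        (fun acc cnt => acc ++ pvDigits cnt) []) = pvData combined := by
  rw [PySem.Dict.foldl_insert_getD_add_one_eq_counter]
  rw [PySem.List.foldl_append_eq_flatMap]
  unfold PySem.Dict.values
  rw [PySem.Dict.items_counter]
  rw [List.map_map, List.flatMap_map]
  simp [pvData]

theorem data_bounds (combined : List Char) : ∀ x ∈ pvData combined, 0 ≤ x ∧ x ≤ 9 := by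
  intro x hx
  unfold pvData at hx
  rcases List.mem_flatMap.mp hx with ⟨ch, _, hx'⟩
  exact pvDigits_bounds _ (Int.natCast_nonneg _) x hx'

-- ---- phase 2: the halving rounds ----

-- membership shape of pyGetD
theorem pyGetD_mem_or (xs : List Int) (i : Int) (d : Int) :
    PySem.List.pyGetD xs i d ∈ xs ∨ PySem.List.pyGetD xs i d = d := by
  unfold PySem.List.pyGetD PySem.List.pyGet?
  cases h : (PySem.List.pyIdx? xs.length i).bind (fun k => xs[k]?) with
  | none => simp
  | some a =>
    rcases Option.bind_eq_some_iff.mp h with ⟨k, _, hk⟩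
    exact Or.inl (by simpa using List.mem_of_getElem? hk)

-- nonnegative index: data[j] for 0 <= j < n
theorem pyGetD_nat (xs : List Int) (j : Nat) (hj : j < xs.length) (d : Int) :
    PySem.List.pyGetD xs ((j : Int)) d = xs[j] := by
  unfold PySem.List.pyGetD PySem.List.pyGet? PySem.List.pyIdx?
  rw [if_pos (by omega), if_pos (by exact_mod_cast hj)]
  show (xs[((j : Int)).toNat]?).getD d = xs[j]
  rw [show ((j : Int)).toNat = j from by omega]
  rw [List.getElem?_eq_getElem hj]
  rfl

-- negative back-index: data[-(j+1)] = data[n-1-j]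
theorem pyGetD_neg (xs : List Int) (j : Nat) (hj : j < xs.length) (d : Int) :
    PySem.List.pyGetD xs (-((j : Int) + 1)) d = xs[xs.length - 1 - j] := by
  unfold PySem.List.pyGetD PySem.List.pyGet? PySem.List.pyIdx?
  rw [if_neg (by omega), if_pos (by omega)]
  have h1 : (-(-((j : Int) + 1))).toNat = j + 1 := by omega
  rw [h1]
  show (xs[xs.length - (j + 1)]?).getD d = xs[xs.length - 1 - j]
  rw [show xs.length - (j + 1) = xs.length - 1 - j from by omega]
  rw [List.getElem?_eq_getElem (by omega)]
  rfl

-- zeta-free unfoldings of the ports (definitional)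
theorem pvStepA_def (data : List Int) : pvStepA data =
    (if PySem.Int.mod ((data.length : Int)) 2 == 1
     then ((PySem.List.pyRange 0 (PySem.Int.floordiv ((data.length : Int)) 2) 1).foldl
        (fun acc i =>
          (PySem.Int.toChars (PySem.List.pyGetD data i 0 + PySem.List.pyGetD data (-(i+1)) 0)).foldl
            (fun a c => a ++ [(PySem.Int.ofChars? [c]).getD 0]) acc) [])
        ++ [PySem.List.pyGetD data (PySem.Int.floordiv ((data.length : Int)) 2) 0]
     else (PySem.List.pyRange 0 (PySem.Int.floordiv ((data.length : Int)) 2) 1).foldl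
        (fun acc i =>
          (PySem.Int.toChars (PySem.List.pyGetD data i 0 + PySem.List.pyGetD data (-(i+1)) 0)).foldl
            (fun a c => a ++ [(PySem.Int.ofChars? [c]).getD 0]) acc) []) := rfl

theorem pvStepB_def (data : List Int) : pvStepB data =
    (if PySem.Int.mod ((data.length : Int)) 2 == 1
     then ((List.zip (PySem.List.slice data none (some (PySem.Int.floordiv ((data.length : Int)) 2))) data.reverse).foldl
        (fun acc p => if 10 ≤ p.1 + p.2 then acc ++ [1, p.1 + p.2 - 10] else acc ++ [p.1 + p.2]) [])
        ++ [PySem.List.pyGetD data (PySem.Int.floordiv ((data.length : Int)) 2) 0]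
     else (List.zip (PySem.List.slice data none (some (PySem.Int.floordiv ((data.length : Int)) 2))) data.reverse).foldl
        (fun acc p => if 10 ≤ p.1 + p.2 then acc ++ [1, p.1 + p.2 - 10] else acc ++ [p.1 + p.2]) []) := rfl

theorem compatibility_def (str1 str2 : String) : compatibility str1 str2 =
    pvLoopA (pvFuel ((PySem.Chars.lower (str1.toList ++ str2.toList)).foldl
      (fun st ch =>
        if PySem.Set.contains st.2 ch then st
        else ((PySem.Int.toChars ((PySem.Chars.count (PySem.Chars.lower (str1.toList ++ str2.toList)) [ch] : Nat) : Int)).foldl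
                (fun acc c => acc ++ [(PySem.Int.ofChars? [c]).getD 0]) st.1,
              PySem.Set.add st.2 ch))
      (([] : List Int), PySem.Set.empty)).1)
      ((PySem.Chars.lower (str1.toList ++ str2.toList)).foldl
      (fun st ch =>
        if PySem.Set.contains st.2 ch then st
        else ((PySem.Int.toChars ((PySem.Chars.count (PySem.Chars.lower (str1.toList ++ str2.toList)) [ch] : Nat) : Int)).foldl
                (fun acc c => acc ++ [(PySem.Int.ofChars? [c]).getD 0]) st.1,
              PySem.Set.add st.2 ch))
      (([] : List Int), PySem.Set.empty)).1 := rfl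

theorem compatibility_alt_def (str1 str2 : String) : compatibility_alt str1 str2 =
    pvFoldB (pvFuel (((PySem.Chars.lower (str1.toList ++ str2.toList)).foldl
        (fun d ch => d.insert ch (d.getD ch 0 + 1)) PySem.Dict.empty).values.foldl
        (fun acc cnt => acc ++ pvDigits cnt) []))
      (((PySem.Chars.lower (str1.toList ++ str2.toList)).foldl
        (fun d ch => d.insert ch (d.getD ch 0 + 1)) PySem.Dict.empty).values.foldl
        (fun acc cnt => acc ++ pvDigits cnt) []) := rfl

theorem step_eq (data : List Int) (hd : ∀ x ∈ data, 0 ≤ x ∧ x ≤ 9) :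
    pvStepA data = pvStepB data := by
  have hfd : PySem.Int.floordiv (data.length : Int) 2 = ((data.length / 2 : Nat) : Int) := by
    exact_mod_cast PySem.Int.floordiv_natCast data.length 2
  have hK : data.length / 2 ≤ data.length := Nat.div_le_self _ _
  rw [pvStepA_def, pvStepB_def]
  rw [hfd]
  have hnd :
      (PySem.List.pyRange 0 ((data.length / 2 : Nat) : Int) 1).foldl
        (fun acc i =>
          (PySem.Int.toChars (PySem.List.pyGetD data i 0 + PySem.List.pyGetD data (-(i+1)) 0)).foldl
            (fun a c => a ++ [(PySem.Int.ofChars? [c]).getD 0]) acc) []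
      = (List.zip (PySem.List.slice data none (some ((data.length / 2 : Nat) : Int))) data.reverse).foldl
          (fun acc p => if 10 ≤ p.1 + p.2 then acc ++ [1, p.1 + p.2 - 10] else acc ++ [p.1 + p.2]) [] := by
    rw [PySem.List.foldl_congr_mem _ _
      (fun (acc : List Int) (i : Int) => acc ++ pvDigits (PySem.List.pyGetD data i 0 + PySem.List.pyGetD data (-(i+1)) 0))
      _ (by intro acc x _; rw [digits_fold_eq])]
    rw [PySem.List.foldl_congr_mem _ _
      (fun (acc : List Int) (p : Int × Int) => acc ++ (if 10 ≤ p.1 + p.2 then [1, p.1 + p.2 - 10] else [p.1 + p.2]))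
      _ (by intro acc p _; by_cases hs : (10:Int) ≤ p.1 + p.2 <;> simp [hs])]
    rw [PySem.List.foldl_append_eq_flatMap, PySem.List.foldl_append_eq_flatMap]
    simp only [List.nil_append]
    rw [PySem.List.slice_to data (by positivity)]
    rw [Int.toNat_natCast]
    rw [PySem.List.pyRange_one, List.flatMap_map]
    rw [List.flatMap_def, List.flatMap_def]
    congr 1
    apply List.ext_getElem
    · simp only [List.length_map, List.length_range, List.length_zip, List.length_take,
        List.length_reverse]
      omega
    · intro j hj1 hj2
      simp only [List.getElem_map, List.getElem_range, List.getElem_zip]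
      have hjK : j < data.length / 2 := by
        simp only [List.length_map, List.length_range] at hj1
        omega
      have hjlen : j < data.length := lt_of_lt_of_le hjK hK
      have hx := hd data[j] (List.getElem_mem _)
      have hy := hd data[data.length - 1 - j] (List.getElem_mem _)
      rw [List.getElem_take, List.getElem_reverse]
      rw [show ((0:Int) + (j : Int)) = ((j : Int)) from by ring]
      rw [show ((j : Int)) + 1 = (((j : Int)) + 1) from rfl]
      rw [pyGetD_nat data j hjlen 0]
      rw [pyGetD_neg data j hjlen 0]
      rw [pvDigits_small _ (by omega) (by omega)]
  rw [hnd]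

theorem step_bounds (data : List Int) (hd : ∀ x ∈ data, 0 ≤ x ∧ x ≤ 9) :
    ∀ x ∈ pvStepB data, 0 ≤ x ∧ x ≤ 9 := by
  have hfd : PySem.Int.floordiv (data.length : Int) 2 = ((data.length / 2 : Nat) : Int) := by
    exact_mod_cast PySem.Int.floordiv_natCast data.length 2
  intro x hx
  rw [pvStepB_def] at hx
  have hnd : ∀ y, y ∈ (List.zip (PySem.List.slice data none (some (PySem.Int.floordiv ((data.length : Int)) 2))) data.reverse).foldl
      (fun acc p => if 10 ≤ p.1 + p.2 then acc ++ [1, p.1 + p.2 - 10] else acc ++ [p.1 + p.2]) [] →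
      0 ≤ y ∧ y ≤ 9 := by
    intro y hy
    rw [PySem.List.foldl_congr_mem _ _
      (fun (acc : List Int) (p : Int × Int) => acc ++ (if 10 ≤ p.1 + p.2 then [1, p.1 + p.2 - 10] else [p.1 + p.2]))
      _ (by intro acc p _; by_cases hs : (10:Int) ≤ p.1 + p.2 <;> simp [hs])] at hy
    rw [PySem.List.foldl_append_eq_flatMap] at hy
    simp only [List.nil_append] at hy
    rw [hfd, PySem.List.slice_to data (by positivity), Int.toNat_natCast] at hy
    rcases List.mem_flatMap.mp hy with ⟨p, hp, hyp⟩
    obtain ⟨hp1, hp2⟩ := List.of_mem_zip (show (p.1, p.2) ∈ _ from by simpa using hp)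
    have h1 : p.1 ∈ data := List.mem_of_mem_take hp1
    have h2 : p.2 ∈ data := List.mem_reverse.mp hp2
    have hb1 := hd p.1 h1
    have hb2 := hd p.2 h2
    by_cases hs : (10:Int) ≤ p.1 + p.2
    · rw [if_pos hs] at hyp
      simp only [List.mem_cons, List.not_mem_nil, or_false] at hyp
      rcases hyp with rfl | rfl <;> omega
    · rw [if_neg hs] at hyp
      simp only [List.mem_singleton] at hyp
      subst hyp
      omega
  split at hx
  · rcases List.mem_append.mp hx with h | h
    · exact hnd x h
    · have hm : x = PySem.List.pyGetD data (PySem.Int.floordiv ((data.length : Int)) 2) 0 := by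
        simpa using h
      rcases pyGetD_mem_or data (PySem.Int.floordiv ((data.length : Int)) 2) 0 with hmem | hdef
      · exact hm ▸ hd _ hmem
      · rw [hm, hdef]
        omega
  · exact hnd x hx

theorem loop_eq (f : Nat) (data : List Int) (hd : ∀ x ∈ data, 0 ≤ x ∧ x ≤ 9) :
    pvLoopA f data = pvFoldB f data := by
  induction f generalizing data with
  | zero => rfl
  | succ f ih =>
    simp only [pvLoopA, pvFoldB]
    by_cases h : 2 < data.length
    · rw [if_pos h, if_neg (show ¬ data.length ≤ 2 from by omega)]
      by_cases he : data = [1, 0, 0]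
      · rw [if_pos he, if_pos he]
      · rw [if_neg he, if_neg he, step_eq data hd]
        exact ih _ (step_bounds data hd)
    · rw [if_neg h, if_pos (Nat.le_of_not_lt h)]

-- ===== VERDICT (by name: the statement is the Claim_ definition above) =====
theorem compatibility_spec : Claim_equal_compatibility := by
  intro str1 str2 _ _
  unfold Spec_compatibility
  rw [compatibility_def, compatibility_alt_def, dataA_eq, dataB_eq]
  exact loop_eq _ _ (data_bounds _)
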